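-- pv_equiv track=rewrite | github.com/mariusBRM/Chain-of-though_UCL | src/post_processing.py | process_function_with_context
-- ===== SOURCE A (Python) =====
-- def process_function_with_context(text, prompt_index):
--     # Split the text into lines
--     lines = text.split('\n')
--
--     # Initialize counter for the prompt index
--     prompt_counter = -1
--     # Initialize variable to store the result
--     result = []
--
--     # Iterate over the lines
--     for line in lines:
--         # If the line starts with '#', increment the prompt counter
--         if line.strip().startswith('#'):
--             prompt_counter += 1
--
--         # If the current prompt counter equals the given prompt index, add the line to the result
--         if prompt_counter == prompt_index and not line.strip().startswith('#'):
--             result.append(line.strip())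
--
--     # Join the result lines with '\n' and return it
--     return '\n'.join(result)
-- ===== SOURCE B (Python) =====
-- def process_function_with_context(text, prompt_index):
--     # Phase 1: skip everything up to and including the (prompt_index+1)-th header
--     # line; phase 2: take stripped lines until the next header, then stop early.
--     rest = text.split('\n')
--     k = prompt_index + 1
--     if k < 0:
--         return ''
--     while k > 0:
--         if not rest:
--             return ''
--         if rest[0].strip().startswith('#'):
--             k -= 1
--         rest = rest[1:]
--     out = []
--     for line in rest:
--         s = line.strip()
--         if s.startswith('#'):
--             break
--         out.append(s)
--     return '\n'.join(out)
-- ===== Notes on version B (the rewrite author's own statement) =====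
-- stated objective: alternative
-- what changed: B replaces A's single counter-carrying scan (testing prompt_index on every line) by a two-phase skip/take decomposition: first skip past the (prompt_index+1)-th header line, then collect stripped lines until the next header and stop early; no counter-vs-index comparison per line and the scan ends at the section boundary.
import Mathlib
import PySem

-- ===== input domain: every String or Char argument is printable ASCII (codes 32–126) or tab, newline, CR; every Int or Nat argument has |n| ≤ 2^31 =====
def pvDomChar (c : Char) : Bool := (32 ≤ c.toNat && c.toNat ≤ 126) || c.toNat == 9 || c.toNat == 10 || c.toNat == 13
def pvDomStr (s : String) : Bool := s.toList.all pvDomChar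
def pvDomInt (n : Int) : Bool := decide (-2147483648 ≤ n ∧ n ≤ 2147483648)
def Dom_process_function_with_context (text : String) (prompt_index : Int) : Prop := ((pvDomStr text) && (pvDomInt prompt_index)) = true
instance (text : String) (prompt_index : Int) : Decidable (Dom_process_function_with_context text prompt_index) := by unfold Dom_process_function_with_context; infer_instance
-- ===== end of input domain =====

-- B replaces A's counter-carrying scan by a two-phase skip/take decomposition:
-- skip past the (prompt_index+1)-th header, then take lines until the next header (alternative).

-- ===== PORT A =====
-- A's loop body: maybe bump the counter, then append the stripped line when the counter matches.
def pvStepA (prompt_index : Int) (st : Int × List String) (line : String) : Int × List String :=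
  let c := if PySem.Str.startswith (PySem.Str.strip line) "#" then st.1 + 1 else st.1
  let r := if c == prompt_index && !(PySem.Str.startswith (PySem.Str.strip line) "#")
           then st.2 ++ [PySem.Str.strip line] else st.2
  (c, r)

def process_function_with_context (text : String) (prompt_index : Int) : String :=
  -- lines = text.split('\n'); sep "\n" ≠ "", so split? is always some
  PySem.Str.join "\n" ((((PySem.Str.split? text "\n").getD []).foldl (pvStepA prompt_index) (-1, [])).2)

-- ===== PORT B =====
-- B phase 1: the while loop — drop lines until k header lines have been consumed; none = ran out ('return ""').
def pvSkip : Int → List String → Option (List String)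
  | k, rest =>
    if k ≤ 0 then some rest
    else match rest with
      | [] => none
      | l :: ls => pvSkip (if PySem.Str.startswith (PySem.Str.strip l) "#" then k - 1 else k) ls
  termination_by _ rest => rest.length

-- B phase 2: the for loop with break — stripped lines until the next header.
def pvTake : List String → List String
  | [] => []
  | l :: ls =>
    let s := PySem.Str.strip l
    if PySem.Str.startswith s "#" then [] else s :: pvTake ls

def process_function_with_context_alt (text : String) (prompt_index : Int) : String :=
  -- sep "\n" ≠ "", so split? is always some
  let rest := (PySem.Str.split? text "\n").getD []
  let k := prompt_index + 1
  if k < 0 then ""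
  else match pvSkip k rest with
    | none => ""
    | some rest' => PySem.Str.join "\n" (pvTake rest')

-- ===== PRECONDITION & SPEC =====
def Spec_process_function_with_context (text : String) (prompt_index : Int) (out : String) : Prop := out = process_function_with_context_alt text prompt_index
instance (text : String) (prompt_index : Int) (out : String) : Decidable (Spec_process_function_with_context text prompt_index out) := by unfold Spec_process_function_with_context; infer_instance

-- ===== CLAIM (what is proved, stated in full; the proofs are below) =====
def Claim_equal_process_function_with_context : Prop := ∀ (text : String) (prompt_index : Int), Dom_process_function_with_context text prompt_index → Spec_process_function_with_context text prompt_index (process_function_with_context text prompt_index)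

-- ===== LEMMAS AND PROOFS =====

-- Recursive characterisation of A's loop: counter c, collected lines of section p.
def pvR (p : Int) : Int → List String → List String
  | _, [] => []
  | c, l :: ls =>
    if PySem.Str.startswith (PySem.Str.strip l) "#" then pvR p (c + 1) ls
    else if c = p then PySem.Str.strip l :: pvR p c ls
    else pvR p c ls

theorem pvR_cons (p c : Int) (l : String) (ls : List String) :
    pvR p c (l :: ls) =
      if PySem.Chars.startswith (PySem.Chars.strip l.toList) ['#'] = true then pvR p (c + 1) ls
      else if c = p then PySem.Str.strip l :: pvR p c ls
      else pvR p c ls := by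
  show (if PySem.Str.startswith (PySem.Str.strip l) "#" then pvR p (c + 1) ls
        else if c = p then PySem.Str.strip l :: pvR p c ls else pvR p c ls) = _
  have h : (PySem.Str.startswith (PySem.Str.strip l) "#" = true)
      = (PySem.Chars.startswith (PySem.Chars.strip l.toList) ['#'] = true) := by
    simp [pysem]
  simp only [h]

theorem pvSkip_stop (k : Int) (rest : List String) (hk : k ≤ 0) :
    pvSkip k rest = some rest := by
  rw [pvSkip.eq_def]; simp [hk]

theorem pvSkip_nil (k : Int) (hk : ¬ k ≤ 0) : pvSkip k [] = none := by
  rw [pvSkip.eq_def]; simp [hk]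

theorem pvSkip_cons (k : Int) (l : String) (ls : List String) (hk : ¬ k ≤ 0) :
    pvSkip k (l :: ls) =
      pvSkip (if PySem.Chars.startswith (PySem.Chars.strip l.toList) ['#'] = true then k - 1 else k) ls := by
  rw [pvSkip.eq_def]
  have h : (PySem.Str.startswith (PySem.Str.strip l) "#" = true)
      = (PySem.Chars.startswith (PySem.Chars.strip l.toList) ['#'] = true) := by
    simp [pysem]
  simp only [hk, if_false, h]

theorem pv_foldA_eq (p : Int) :
    ∀ (lines : List String) (c : Int) (acc : List String),
      (lines.foldl (pvStepA p) (c, acc)).2 = acc ++ pvR p c lines := by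
  intro lines
  induction lines with
  | nil => intro c acc; simp [pvR]
  | cons l ls ih =>
    intro c acc
    rw [List.foldl_cons, pvR_cons]
    by_cases hs : PySem.Chars.startswith (PySem.Chars.strip l.toList) ['#'] = true
    · have h1 : pvStepA p (c, acc) l = (c + 1, acc) := by simp [pvStepA, hs]
      rw [h1, ih, if_pos hs]
    · rw [if_neg hs]
      by_cases hc : c = p
      · have h1 : pvStepA p (c, acc) l = (c, acc ++ [PySem.Str.strip l]) := by
          simp [pvStepA, hs, hc]
        rw [h1, ih, if_pos hc]; simp
      · have h1 : pvStepA p (c, acc) l = (c, acc) := by simp [pvStepA, hs, hc]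
        rw [h1, ih, if_neg hc]

theorem pvR_gt (p : Int) :
    ∀ (lines : List String) (c : Int), p < c → pvR p c lines = [] := by
  intro lines
  induction lines with
  | nil => intro c _; simp [pvR]
  | cons l ls ih =>
    intro c hc
    rw [pvR_cons]
    by_cases hs : PySem.Chars.startswith (PySem.Chars.strip l.toList) ['#'] = true
    · rw [if_pos hs]; exact ih (c + 1) (by omega)
    · rw [if_neg hs, if_neg (by omega : ¬ c = p)]; exact ih c hc

theorem pvR_eq_take (p : Int) :
    ∀ (lines : List String), pvR p p lines = pvTake lines := by
  intro lines
  induction lines with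
  | nil => simp [pvR, pvTake]
  | cons l ls ih =>
    rw [pvR_cons]
    by_cases hs : PySem.Chars.startswith (PySem.Chars.strip l.toList) ['#'] = true
    · rw [if_pos hs, pvR_gt p ls (p + 1) (by omega)]
      simp [pvTake, hs]
    · rw [if_neg hs, if_pos rfl, ih]
      simp [pvTake, hs]

theorem pvR_skip (p : Int) :
    ∀ (lines : List String) (c : Int), c < p →
      pvR p c lines =
        (match pvSkip (p - c) lines with
         | none => []
         | some rest => pvTake rest) := by
  intro lines
  induction lines with
  | nil =>
    intro c hc
    rw [pvSkip_nil _ (by omega)]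
    simp [pvR]
  | cons l ls ih =>
    intro c hc
    rw [pvSkip_cons _ _ _ (by omega), pvR_cons]
    by_cases hs : PySem.Chars.startswith (PySem.Chars.strip l.toList) ['#'] = true
    · rw [if_pos hs, if_pos hs]
      by_cases he : c + 1 = p
      · rw [pvSkip_stop _ _ (by omega), he, pvR_eq_take]
      · rw [ih (c + 1) (by omega)]
        have h2 : p - (c + 1) = p - c - 1 := by omega
        rw [h2]
    · rw [if_neg hs, if_neg hs, if_neg (by omega : ¬ c = p)]
      exact ih c hc

-- ===== VERDICT (by name: the statement is the Claim_ definition above) =====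
theorem process_function_with_context_spec : Claim_equal_process_function_with_context := by
  intro text prompt_index _
  show process_function_with_context text prompt_index = process_function_with_context_alt text prompt_index
  unfold process_function_with_context process_function_with_context_alt
  rw [pv_foldA_eq prompt_index _ (-1) []]
  simp only [List.nil_append]
  set lines := (PySem.Str.split? text "\n").getD [] with hl
  by_cases h1 : prompt_index + 1 < 0
  · rw [if_pos h1, pvR_gt prompt_index lines (-1) (by omega)]
    simp [PySem.Str.join]
  · rw [if_neg h1]
    by_cases h2 : prompt_index = -1
    · subst h2
      rw [pvSkip_stop _ _ (by omega), pvR_eq_take]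
    · rw [pvR_skip prompt_index lines (-1) (by omega)]
      have h3 : prompt_index - (-1) = prompt_index + 1 := by omega
      rw [h3]
      cases pvSkip (prompt_index + 1) lines with
      | none => simp [PySem.Str.join]
      | some rest => simp
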